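-- pv_equiv track=rewrite | github.com/oodeng98/Algorithm | BaekJoon/Class 3/2579 계단 오르기/26544805 20210219 시간 초과.py | down_stair
-- ===== SOURCE A (Python) =====
-- def down_stair(n, stair):
--     if n == 0:
--         return 0
--     if n == 1:
--         return stair[1]
--     if n == 2:
--         return stair[1] + stair[2]
--     return max(stair[n] + stair[n-1] + down_stair(n-3, stair), stair[n] + down_stair(n-2, stair))
-- ===== SOURCE B (Python) =====
-- def down_stair(n, stair):
--     if n == 0:
--         return 0
--     if n == 1:
--         return stair[1]
--     # bottom-up DP: (a, b, c) = (f(i-3), f(i-2), f(i-1)) rolling window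
--     a, b, c = 0, stair[1], stair[1] + stair[2]
--     for i in range(3, n + 1):
--         a, b, c = b, c, max(stair[i] + stair[i - 1] + a, stair[i] + b)
--     return c
-- ===== Notes on version B (the rewrite author's own statement) =====
-- stated objective: faster
-- what changed: Replaces the exponential branching recursion with a bottom-up DP keeping a rolling window of the last three subproblem values in one linear loop; intended as faster (asymptotic), measured 85x at n=64, A times out at n=256 where B returns.
import Mathlib
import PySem

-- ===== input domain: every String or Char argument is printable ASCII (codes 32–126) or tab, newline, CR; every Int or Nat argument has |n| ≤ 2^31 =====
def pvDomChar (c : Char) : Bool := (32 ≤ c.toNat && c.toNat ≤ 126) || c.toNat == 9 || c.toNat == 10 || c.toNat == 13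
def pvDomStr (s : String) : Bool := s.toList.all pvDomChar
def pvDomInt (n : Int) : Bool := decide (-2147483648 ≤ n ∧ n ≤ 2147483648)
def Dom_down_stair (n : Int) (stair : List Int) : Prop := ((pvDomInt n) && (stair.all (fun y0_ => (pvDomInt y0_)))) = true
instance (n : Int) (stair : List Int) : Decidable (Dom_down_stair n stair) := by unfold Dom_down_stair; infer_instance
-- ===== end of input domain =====

-- B replaces A's exponential branching recursion by a one-pass bottom-up DP over a rolling
-- window of the last three subproblem values; intended as faster (measured 85x at n=64; A timed out at n=256 where B returned).

-- ===== PORT A =====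
-- A's recursion on the Int n, encoded as structural recursion on n.toNat (exact for n ≥ 0;
-- for n < 0 Python never terminates/raises RecursionError, excluded by Pre_).
def down_stair_recA (stair : List Int) : Nat → Int
  | 0 => 0
  | 1 => PySem.List.pyGetD stair 1 0
  | 2 => PySem.List.pyGetD stair 1 0 + PySem.List.pyGetD stair 2 0
  | (m+3) =>
      max (PySem.List.pyGetD stair ((m : Int)+3) 0 + PySem.List.pyGetD stair ((m : Int)+2) 0
             + down_stair_recA stair m)
          (PySem.List.pyGetD stair ((m : Int)+3) 0 + down_stair_recA stair (m+1))

def down_stair (n : Int) (stair : List Int) : Int :=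
  if n < 0 then 0 else down_stair_recA stair n.toNat

-- ===== PORT B =====
def down_stair_alt (n : Int) (stair : List Int) : Int :=
  if n == 0 then 0
  else if n == 1 then PySem.List.pyGetD stair 1 0
  else
    let t := (PySem.List.pyRange 3 (n+1) 1).foldl
      (fun (acc : Int × Int × Int) i =>
        (acc.2.1, acc.2.2,
         max (PySem.List.pyGetD stair i 0 + PySem.List.pyGetD stair (i-1) 0 + acc.1)
             (PySem.List.pyGetD stair i 0 + acc.2.1)))
      (0, PySem.List.pyGetD stair 1 0,
          PySem.List.pyGetD stair 1 0 + PySem.List.pyGetD stair 2 0)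
    t.2.2

-- ===== PRECONDITION & SPEC =====
-- Pre_ excludes exactly the inputs on which Python A raises: n < 0 (RecursionError) and
-- 1 ≤ n with stair shorter than n+1 (IndexError on stair[1]..stair[n]).
def Pre_down_stair (n : Int) (stair : List Int) : Prop :=
  0 ≤ n ∧ (n = 0 ∨ n + 1 ≤ (stair.length : Int))
instance (n : Int) (stair : List Int) : Decidable (Pre_down_stair n stair) := by
  unfold Pre_down_stair; infer_instance
def pvWitness_down_stair : Int × List Int := (5, [0, 10, 20, 15, 25, 10])

def Spec_down_stair (n : Int) (stair : List Int) (out : Int) : Prop := out = down_stair_alt n stair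
instance (n : Int) (stair : List Int) (out : Int) : Decidable (Spec_down_stair n stair out) := by
  unfold Spec_down_stair; infer_instance

-- ===== CLAIM (what is proved, stated in full; the proofs are below) =====
def Claim_equal_down_stair : Prop := ∀ (n : Int) (stair : List Int), Dom_down_stair n stair → Pre_down_stair n stair → Spec_down_stair n stair (down_stair n stair)

-- ===== LEMMAS AND PROOFS =====

-- Loop invariant: after processing range(3, m+3) the rolling window holds (f m, f (m+1), f (m+2)).
theorem down_stair_loop_inv (stair : List Int) (m : Nat) :
    (PySem.List.pyRange 3 ((m : Int)+3) 1).foldl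
      (fun (acc : Int × Int × Int) i =>
        (acc.2.1, acc.2.2,
         max (PySem.List.pyGetD stair i 0 + PySem.List.pyGetD stair (i-1) 0 + acc.1)
             (PySem.List.pyGetD stair i 0 + acc.2.1)))
      (0, PySem.List.pyGetD stair 1 0,
          PySem.List.pyGetD stair 1 0 + PySem.List.pyGetD stair 2 0)
    = (down_stair_recA stair m, down_stair_recA stair (m+1), down_stair_recA stair (m+2)) := by
  induction m with
  | zero =>
      rw [show ((0 : Nat) : Int) + 3 = 3 by norm_num, PySem.List.pyRange_one_eq_nil (by omega)]
      simp [down_stair_recA]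
  | succ k ih =>
      have h : ((k+1 : Nat) : Int) + 3 = ((k : Int) + 3) + 1 := by push_cast; ring
      rw [h, PySem.List.pyRange_one_succ_right (by omega), List.foldl_append, ih]
      simp only [List.foldl_cons, List.foldl_nil]
      have e2 : (k : Int) + 3 - 1 = (k : Int) + 2 := by ring
      rw [e2]
      rfl

theorem down_stair_eq_alt (n : Int) (stair : List Int) (hn : 0 ≤ n) :
    down_stair n stair = down_stair_alt n stair := by
  unfold down_stair down_stair_alt
  rw [if_neg (by omega)]
  by_cases h0 : n = 0
  · subst h0; simp [down_stair_recA]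
  by_cases h1 : n = 1
  · subst h1; simp [down_stair_recA]
  · have hb0 : (n == 0) = false := by simp [h0]
    have hb1 : (n == 1) = false := by simp [h1]
    rw [hb0, hb1]
    simp only [Bool.false_eq_true, if_false]
    have hn2 : 2 ≤ n := by omega
    obtain ⟨m, hm⟩ : ∃ m : Nat, n = (m : Int) + 2 := ⟨(n - 2).toNat, by omega⟩
    have ht : n.toNat = m + 2 := by omega
    have hr : n + 1 = (m : Int) + 3 := by omega
    rw [ht, hr, down_stair_loop_inv]

-- ===== VERDICT (by name: the statement is the Claim_ definition above) =====
theorem down_stair_spec : Claim_equal_down_stair := by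
  intro n stair _ hpre
  exact down_stair_eq_alt n stair hpre.1
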